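-- pv_equiv track=rewrite | github.com/david7115/kepco_01_juso | app.py | nat_sort_uniq
-- ===== SOURCE A (Python) =====
-- from typing import List, Dict, Any, Optional
--
-- def split_tokenize(s: str) -> List[str]:
--     s = "" if s is None else str(s)
--     buf = ""
--     out: List[str] = []
--     for ch in s:
--         if ch.isdigit():
--             buf += ch
--         else:
--             if buf:
--                 out.append(buf)
--                 buf = ""
--             out.append(ch)
--     if buf:
--         out.append(buf)
--     return out
--
-- def nat_sort_uniq(items: List[str]) -> List[str]:
--     def nat_key(x: str):
--         key = []
--         for t in split_tokenize(x):
--             if t.isdigit(): key.append((0, int(t)))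
--             else: key.append((1, t))
--         return tuple(key)
--     cleaned = [str(x).strip() for x in items if x is not None and str(x).strip() != ""]
--     return sorted(set(cleaned), key=nat_key)
-- ===== SOURCE B (Python) =====
-- def nat_sort_uniq(items):
--     # Index-based greedy scan builds each sort key directly (no token buffer, no
--     # intermediate token list); dedup/clean via one set comprehension; the set is
--     # pre-sorted lexicographically so ties between distinct strings with equal
--     # natural keys come out in deterministic (lexicographic) order.
--     def key(s):
--         k, i, n = [], 0, len(s)
--         while i < n:
--             if s[i].isdigit():
--                 j = i + 1
--                 while j < n and s[j].isdigit():
--                     j += 1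
--                 k.append((0, int(s[i:j])))
--                 i = j
--             else:
--                 k.append((1, s[i]))
--                 i += 1
--         return k
--     cleaned = {str(x).strip() for x in items if x is not None and str(x).strip() != ""}
--     return sorted(sorted(cleaned), key=key)
-- ===== Notes on version B (the rewrite author's own statement) =====
-- stated objective: faster
-- what changed: The buffer-accumulating tokenizer (build a token list, then re-classify each token with isdigit and re-parse it with int) is replaced by a single index-based greedy scan that emits each (0,int)/(1,char) key component directly (no intermediate token list, no per-token re-scan), cleaning/dedup is folded into one set comprehension, and the set is pre-sorted lexicographically before the stable key sort so equal-key ties are deterministic instead of set-hash-ordered.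
-- outside the precondition, e.g. on nat_sort_uniq(['07', '7']): A returns ['7', '07'], B returns ['07', '7']
import Mathlib
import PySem

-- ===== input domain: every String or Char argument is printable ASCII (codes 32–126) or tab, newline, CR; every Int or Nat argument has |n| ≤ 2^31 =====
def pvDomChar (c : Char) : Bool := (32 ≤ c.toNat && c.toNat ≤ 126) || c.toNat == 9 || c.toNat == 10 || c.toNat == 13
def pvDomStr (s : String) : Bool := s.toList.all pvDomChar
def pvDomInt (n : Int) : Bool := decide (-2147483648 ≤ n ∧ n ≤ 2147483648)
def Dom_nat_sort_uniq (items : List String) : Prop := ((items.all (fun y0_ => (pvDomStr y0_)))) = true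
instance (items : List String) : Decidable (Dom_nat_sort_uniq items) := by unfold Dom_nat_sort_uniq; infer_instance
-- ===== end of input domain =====

-- B replaces A's buffer-accumulating tokenizer (token list built first, each token then
-- re-classified and re-parsed) by one greedy scan that emits each key component directly,
-- folds clean+dedup into a single set comprehension, and pre-sorts the set
-- lexicographically so that equal-key ties are deterministic (objective: faster key building;
-- a timing run measured B faster at the largest sizes).

-- ===== PORT A =====
-- the 'for ch in s' loop of split_tokenize, state = (buf, out)
def pvTokA (buf : List Char) (out : List String) : List Char → List String
  | [] => if buf.isEmpty then out else out ++ [String.ofList buf]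
  | c :: cs =>
      if PySem.Chars.isdigit c then pvTokA (buf ++ [c]) out cs
      else pvTokA [] ((if buf.isEmpty then out else out ++ [String.ofList buf]) ++ [String.ofList [c]]) cs

def split_tokenize (s : String) : List String := pvTokA [] [] s.toList

-- nat_key: loop over tokens, appending (0, int t) or (1, t); a Python tuple element is
-- modelled as Lex (Int ⊕ String) (inl before inr, matching (0,_) < (1,_)).
def pvNatKeyA (x : String) : List (Lex (Int ⊕ String)) :=
  (split_tokenize x).foldl
    (fun key t =>
      if PySem.Str.strIsdigit t then key ++ [toLex (Sum.inl ((PySem.Int.ofStr? t).getD 0))]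
      else key ++ [toLex (Sum.inr t)])
    []

def nat_sort_uniq (items : List String) : List String :=
  let cleaned := items.foldl
    (fun acc x => if PySem.Str.strip x != "" then acc ++ [PySem.Str.strip x] else acc) []
  PySem.List.sorted (PySem.Set.ofList cleaned) pvNatKeyA false

-- ===== PORT B =====
-- Source B's key: index-based greedy scan (the inner 'while j' = takeWhile/dropWhile on the
-- remaining characters), emitting key components directly; int(s[i:j]) = ofChars? (never
-- none on a digit run, hence .getD 0).
def pvKeyB : List Char → List (Lex (Int ⊕ String))
  | c :: cs =>
      if PySem.Chars.isdigit c then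
        toLex (Sum.inl ((PySem.Int.ofChars? (c :: cs.takeWhile PySem.Chars.isdigit)).getD 0))
          :: pvKeyB (cs.dropWhile PySem.Chars.isdigit)
      else toLex (Sum.inr (String.ofList [c])) :: pvKeyB cs
  | [] => []
  termination_by cs => cs.length
  decreasing_by
  · have := List.length_dropWhile_le PySem.Chars.isdigit cs; simp; omega
  · simp

def nat_sort_uniq_alt (items : List String) : List String :=
  PySem.List.sorted
    (PySem.List.sorted
      (PySem.Set.ofList ((items.filter (fun x => PySem.Str.strip x != "")).map PySem.Str.strip))
      (fun s => s) false)
    (fun x => pvKeyB x.toList) false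

-- ===== PRECONDITION & SPEC =====
-- pvKeyPre: the natural-sort key of a string, written in closed form (adjacent grouping by
-- digit-ness, digit groups parsed to an integer, other characters kept one by one); used
-- only to STATE Pre_, independent of both ports.
def pvKeyPre (s : String) : List (Lex (Int ⊕ String)) :=
  (s.toList.splitBy (fun a b => PySem.Chars.isdigit a == PySem.Chars.isdigit b)).flatMap
    (fun g => if g.any PySem.Chars.isdigit then [toLex (Sum.inl ((PySem.Int.ofChars? g).getD 0))]
      else g.map (fun c => toLex (Sum.inr (String.ofList [c]))))

-- Pre_ excludes lists in which two DISTINCT cleaned items have the same natural-sort key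
-- (e.g. '07' and '7'): there Python's sorted(set(...)) breaks the tie by CPython's
-- randomized set hash order, which is accidental; B breaks such ties lexicographically.
def Pre_nat_sort_uniq (items : List String) : Prop :=
  List.Pairwise (fun a b => a ≠ b → pvKeyPre a ≠ pvKeyPre b)
    ((items.filter (fun x => PySem.Str.strip x != "")).map PySem.Str.strip)
instance (items : List String) : Decidable (Pre_nat_sort_uniq items) := by
  unfold Pre_nat_sort_uniq; infer_instance

def pvWitness_nat_sort_uniq : List String := ["b10", " a2 ", "a10", "b2", "b10", ""]

def Spec_nat_sort_uniq (items : List String) (out : List String) : Prop := out = nat_sort_uniq_alt items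
instance (items : List String) (out : List String) : Decidable (Spec_nat_sort_uniq items out) := by unfold Spec_nat_sort_uniq; infer_instance

-- ===== CLAIM (what is proved, stated in full; the proofs are below) =====
def Claim_equal_nat_sort_uniq : Prop := ∀ (items : List String), Dom_nat_sort_uniq items → Pre_nat_sort_uniq items → Spec_nat_sort_uniq items (nat_sort_uniq items)

-- ===== LEMMAS AND PROOFS =====

-- closed form of A's tokenizer loop, used to relate it to B's greedy scan
def pvToks (buf : List Char) : List Char → List String
  | [] => if buf.isEmpty then [] else [String.ofList buf]
  | c :: cs =>
      if PySem.Chars.isdigit c then pvToks (buf ++ [c]) cs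
      else (if buf.isEmpty then [] else [String.ofList buf]) ++ String.ofList [c] :: pvToks [] cs

-- greedy-run form of the token list (token strings of B's scan)
def pvReTok : List Char → List String
  | c :: cs =>
      if PySem.Chars.isdigit c then
        String.ofList (c :: cs.takeWhile PySem.Chars.isdigit) :: pvReTok (cs.dropWhile PySem.Chars.isdigit)
      else String.ofList [c] :: pvReTok cs
  | [] => []
  termination_by cs => cs.length
  decreasing_by
  · have := List.length_dropWhile_le PySem.Chars.isdigit cs; simp; omega
  · simp

theorem pvTokA_eq (cs : List Char) : ∀ buf out, pvTokA buf out cs = out ++ pvToks buf cs := by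
  induction cs with
  | nil => intro buf out; by_cases h : buf.isEmpty <;> simp [pvTokA, pvToks, h]
  | cons c cs ih =>
      intro buf out
      by_cases h : PySem.Chars.isdigit c
      · simp [pvTokA, pvToks, h, ih]
      · by_cases hb : buf.isEmpty <;> simp [pvTokA, pvToks, h, hb, ih]

theorem pvToks_eq (cs : List Char) : ∀ buf,
    pvToks buf cs =
      (if buf.isEmpty then pvReTok cs
       else String.ofList (buf ++ cs.takeWhile PySem.Chars.isdigit)
              :: pvReTok (cs.dropWhile PySem.Chars.isdigit)) := by
  induction cs with
  | nil => intro buf; by_cases hb : buf.isEmpty <;> simp [pvToks, pvReTok, hb]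
  | cons c cs ih =>
      intro buf
      by_cases h : PySem.Chars.isdigit c
      · by_cases hb : buf.isEmpty
        · have hbe : buf = [] := by simpa using hb
          subst hbe
          simp [pvToks, pvReTok, h, ih]
        · simp [pvToks, h, hb, ih]
      · by_cases hb : buf.isEmpty
        · simp [pvToks, pvReTok, h, hb, ih]
        · simp [pvToks, pvReTok, h, hb, ih]

theorem split_tokenize_eq (s : String) : split_tokenize s = pvReTok s.toList := by
  simp [split_tokenize, pvTokA_eq, pvToks_eq]

theorem pvReTok_map_key (cs : List Char) :
    (pvReTok cs).map
      (fun t =>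
        if PySem.Str.strIsdigit t then toLex (Sum.inl ((PySem.Int.ofStr? t).getD 0))
        else toLex (Sum.inr t))
      = pvKeyB cs := by
  induction cs using pvReTok.induct with
  | case1 c cs h ih =>
      have hdig : PySem.Chars.strIsdigit (c :: cs.takeWhile PySem.Chars.isdigit) = true := by
        simp [PySem.Chars.strIsdigit, h, List.all_takeWhile]
      simp only [PySem.Str.strIsdigit] at ih ⊢
      simp [pvReTok, pvKeyB, h, hdig, PySem.Int.ofStr?_ofList, ih]
  | case2 c cs h ih =>
      have hdig : PySem.Chars.strIsdigit [c] = false := by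
        simp [PySem.Chars.strIsdigit, h]
      simp only [PySem.Str.strIsdigit] at ih ⊢
      simp [pvReTok, pvKeyB, h, hdig, ih]
  | case3 => simp [pvReTok, pvKeyB]

theorem pvNatKeyA_eq : pvNatKeyA = fun x => pvKeyB x.toList := by
  funext x
  have hc := PySem.List.foldl_congr_mem
    (l := split_tokenize x) (init := ([] : List (Lex (Int ⊕ String))))
    (f := fun key t =>
      if PySem.Str.strIsdigit t then key ++ [toLex (Sum.inl ((PySem.Int.ofStr? t).getD 0))]
      else key ++ [toLex (Sum.inr t)])
    (g := fun key t =>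
      key ++ [if PySem.Str.strIsdigit t then toLex (Sum.inl ((PySem.Int.ofStr? t).getD 0))
              else toLex (Sum.inr t)])
    (fun acc t _ => by
      show (if PySem.Str.strIsdigit t then acc ++ [toLex (Sum.inl ((PySem.Int.ofStr? t).getD 0))] else acc ++ [toLex (Sum.inr t)]) = acc ++ [if PySem.Str.strIsdigit t then toLex (Sum.inl ((PySem.Int.ofStr? t).getD 0)) else toLex (Sum.inr t)]
      split_ifs <;> rfl)
  rw [pvNatKeyA, hc, PySem.List.foldl_append_singleton_eq_map, split_tokenize_eq,
    pvReTok_map_key]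
  simp

theorem cleaned_eq (items : List String) :
    items.foldl
      (fun acc x => if PySem.Str.strip x != "" then acc ++ [PySem.Str.strip x] else acc) []
    = (items.filter (fun x => PySem.Str.strip x != "")).map PySem.Str.strip := by
  rw [PySem.List.foldl_append_if]
  simp

-- ---- splitBy characterization: pvKeyPre computes the same key as B's greedy scan ----

theorem pvSplitBy_loop_acc (R : Char → Char → Bool) (cs : List Char) : ∀ b r acc,
    List.splitBy.loop R cs b r acc = acc.reverse ++ List.splitBy.loop R cs b r [] := by
  induction cs with
  | nil => intro b r acc; simp [List.splitBy.loop]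
  | cons a as ih =>
      intro b r acc
      by_cases h : R b a
      · simp only [List.splitBy.loop, h]
        rw [ih a (b :: r) acc]
      · simp only [List.splitBy.loop, h]
        rw [ih a [] ((b :: r).reverse :: acc), ih a [] [(b :: r).reverse]]
        simp

theorem pvSplitBy_loop_eq (cs : List Char) : ∀ b r,
    List.splitBy.loop (fun a b => PySem.Chars.isdigit a == PySem.Chars.isdigit b) cs b r []
      = ((b :: r).reverse ++ cs.takeWhile (fun x => PySem.Chars.isdigit x == PySem.Chars.isdigit b))
          :: (cs.dropWhile (fun x => PySem.Chars.isdigit x == PySem.Chars.isdigit b)).splitBy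
              (fun a b => PySem.Chars.isdigit a == PySem.Chars.isdigit b) := by
  induction cs with
  | nil => intro b r; simp [List.splitBy.loop, List.splitBy]
  | cons a as ih =>
      intro b r
      by_cases h : PySem.Chars.isdigit b == PySem.Chars.isdigit a
      · have hba : PySem.Chars.isdigit a = PySem.Chars.isdigit b := (beq_iff_eq.mp h).symm
        simp only [List.splitBy.loop, h]
        rw [ih a (b :: r)]
        simp [hba]
      · simp only [List.splitBy.loop, h]
        rw [pvSplitBy_loop_acc]
        have hx : (PySem.Chars.isdigit a == PySem.Chars.isdigit b) = false := by
          cases hh : PySem.Chars.isdigit a == PySem.Chars.isdigit b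
          · rfl
          · exact absurd (beq_iff_eq.mpr (beq_iff_eq.mp hh).symm) h
        simp [hx, List.splitBy]

theorem pvSplitBy_cons (c : Char) (cs : List Char) :
    (c :: cs).splitBy (fun a b => PySem.Chars.isdigit a == PySem.Chars.isdigit b)
      = (c :: cs.takeWhile (fun x => PySem.Chars.isdigit x == PySem.Chars.isdigit c))
          :: (cs.dropWhile (fun x => PySem.Chars.isdigit x == PySem.Chars.isdigit c)).splitBy
              (fun a b => PySem.Chars.isdigit a == PySem.Chars.isdigit b) := by
  rw [List.splitBy, pvSplitBy_loop_eq]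
  simp

-- flatSplit: the body of pvKeyPre on a char list
def pvFlatSplit (cs : List Char) : List (Lex (Int ⊕ String)) :=
  (cs.splitBy (fun a b => PySem.Chars.isdigit a == PySem.Chars.isdigit b)).flatMap
    (fun g => if g.any PySem.Chars.isdigit then [toLex (Sum.inl ((PySem.Int.ofChars? g).getD 0))]
      else g.map (fun c => toLex (Sum.inr (String.ofList [c]))))

theorem pvFlatSplit_absorb (cs : List Char) :
    (cs.takeWhile (fun x => PySem.Chars.isdigit x == false)).map
        (fun c => toLex (Sum.inr (String.ofList [c]) : Int ⊕ String))
      ++ pvFlatSplit (cs.dropWhile (fun x => PySem.Chars.isdigit x == false))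
    = pvFlatSplit cs := by
  induction cs with
  | nil => simp
  | cons t ts _ =>
      by_cases h : PySem.Chars.isdigit t
      · simp [h]
      · have h' : PySem.Chars.isdigit t = false := by simpa using h
        have hgrp := pvSplitBy_cons t ts
        rw [h'] at hgrp
        have hany : (t :: ts.takeWhile (fun x => PySem.Chars.isdigit x == false)).any PySem.Chars.isdigit = false := by
          simp [h']
          intro x hx
          simpa using List.mem_takeWhile_imp hx
        unfold pvFlatSplit
        rw [hgrp, List.flatMap_cons, hany]
        simp [h']

theorem pvFlatSplit_eq (cs : List Char) : pvFlatSplit cs = pvKeyB cs := by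
  induction cs using pvKeyB.induct with
  | case1 c cs h ih =>
      have hgrp := pvSplitBy_cons c cs
      rw [h] at hgrp
      have hpred : (fun x => PySem.Chars.isdigit x == true) = PySem.Chars.isdigit := by
        funext x; simp
      rw [hpred] at hgrp
      have hany : (c :: cs.takeWhile PySem.Chars.isdigit).any PySem.Chars.isdigit = true := by
        simp [h]
      unfold pvFlatSplit at ih ⊢
      rw [hgrp, List.flatMap_cons, hany, pvKeyB]
      simp only [h, if_true, List.singleton_append, ih]
  | case2 c cs h ih =>
      have h' : PySem.Chars.isdigit c = false := by simpa using h
      have hgrp := pvSplitBy_cons c cs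
      rw [h'] at hgrp
      have hany : (c :: cs.takeWhile (fun x => PySem.Chars.isdigit x == false)).any PySem.Chars.isdigit = false := by
        simp [h']
        intro x hx
        simpa using List.mem_takeWhile_imp hx
      have habs := pvFlatSplit_absorb cs
      unfold pvFlatSplit at ih habs ⊢
      rw [hgrp, List.flatMap_cons, hany, pvKeyB]
      simp only [h', Bool.false_eq_true, if_false, List.map_cons, List.cons_append] at habs ⊢
      rw [habs, ih]
  | case3 => simp [pvFlatSplit, pvKeyB]

theorem pvKeyPre_eq : pvKeyPre = fun s => pvKeyB s.toList := by
  funext s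
  rw [show pvKeyPre s = pvFlatSplit s.toList from rfl, pvFlatSplit_eq]

-- ---- instance transport: the ports' default List LT instances vs the LinearOrder ones ----

theorem pvSorted_inst (xs : List String) (key : String → List (Lex (Int ⊕ String))) :
    PySem.List.sorted xs key
      = @PySem.List.sorted String (List (Lex (Int ⊕ String))) List.instLinearOrder.toLT
          LinearOrder.toDecidableLT xs key false := by
  simp only [PySem.List.sorted, Bool.false_eq_true, if_false]
  have hbf : (fun a b : String => @decide (key a < key b) (List.decidableLT _ _))
      = (fun a b : String => @decide (@LT.lt _ List.instLinearOrder.toLT (key a) (key b))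
          (@LinearOrder.toDecidableLT _ List.instLinearOrder (key a) (key b))) := by
    funext a b
    exact decide_eq_decide.mpr (Iff.of_eq (by rfl))
  rw [hbf]

-- ===== VERDICT (by name: the statement is the Claim_ definition above) =====
theorem nat_sort_uniq_spec : Claim_equal_nat_sort_uniq := by
  intro items _ hpre
  unfold Spec_nat_sort_uniq nat_sort_uniq nat_sort_uniq_alt
  rw [cleaned_eq, pvNatKeyA_eq]
  unfold Pre_nat_sort_uniq at hpre
  rw [pvKeyPre_eq] at hpre
  set cl := (items.filter (fun x => PySem.Str.strip x != "")).map PySem.Str.strip with hcl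
  set S : List String := PySem.Set.ofList cl with hS
  set keyf : String → List (Lex (Int ⊕ String)) := fun x => pvKeyB x.toList with hk
  set inner := PySem.List.sorted S (fun s => s) false with hinner
  have hpermI : inner.Perm S := PySem.List.sorted_perm S (fun s => s) false
  have hpermB : (PySem.List.sorted inner keyf false).Perm S :=
    (PySem.List.sorted_perm inner keyf false).trans hpermI
  have hndS : S.Nodup := PySem.Set.nodup_ofList cl
  have hnd : (PySem.List.sorted inner keyf false).Nodup := hpermB.symm.nodup hndS
  have hle := PySem.List.sorted_pairwise inner keyf
  rw [← pvSorted_inst] at hle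
  have hmem : ∀ a, a ∈ PySem.List.sorted inner keyf false → a ∈ cl := by
    intro a ha
    exact (PySem.Set.mem_ofList cl a).mp (hpermB.mem_iff.mp ha)
  have hsym : Symmetric (fun a b : String => a ≠ b → keyf a ≠ keyf b) :=
    fun a b hab hne heq => hab hne.symm heq.symm
  have hforall := List.Pairwise.forall hsym hpre
  have hlt : List.Pairwise (fun a b => keyf a < keyf b) (PySem.List.sorted inner keyf false) :=
    (List.Pairwise.and hnd hle).imp_of_mem
      (fun {a b} ha hb hh =>
        lt_of_le_of_ne hh.2 (hforall (hmem a ha) (hmem b hb) hh.1 hh.1))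
  have hmain := PySem.List.sorted_eq_of_perm_of_pairwise_lt S
    (PySem.List.sorted inner keyf false) keyf hpermB hlt
  rw [pvSorted_inst S keyf]
  exact hmain
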